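-- pv_equiv track=rewrite | github.com/dch239/Hidden-Markov-Model-POS-Tagging | main.py | heuristic_learn
-- ===== SOURCE A (Python) =====
-- def heuristic_learn(train_data):
--     unambiguous_tags = dict()
--     for i, sent in enumerate(train_data):
--         for j, word in enumerate(sent):
--             if word[1] in unambiguous_tags and unambiguous_tags[word[1]] != word[2]:
--                 unambiguous_tags[word[1]] = '<ambiguous>'
--                 continue
--             unambiguous_tags[word[1]] = word[2]
--     return unambiguous_tags
-- ===== SOURCE B (Python) =====
-- def heuristic_learn(train_data):
--     labels = {}
--     for sent in train_data:
--         for word in sent: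
--             labels.setdefault(word[1], set()).add(word[2])
--     out = {}
--     for tag, s in labels.items():
--         out[tag] = next(iter(s)) if len(s) == 1 else '<ambiguous>'
--     return out
-- ===== Notes on version B (the rewrite author's own statement) =====
-- stated objective: alternative
-- what changed: B replaces A's single decide-as-you-go loop with a running sentinel value by two differently-shaped passes: first group all observed labels per tag into a set (tags in first-occurrence order), then collapse each set to its unique label or '<ambiguous>'.
import Mathlib
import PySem

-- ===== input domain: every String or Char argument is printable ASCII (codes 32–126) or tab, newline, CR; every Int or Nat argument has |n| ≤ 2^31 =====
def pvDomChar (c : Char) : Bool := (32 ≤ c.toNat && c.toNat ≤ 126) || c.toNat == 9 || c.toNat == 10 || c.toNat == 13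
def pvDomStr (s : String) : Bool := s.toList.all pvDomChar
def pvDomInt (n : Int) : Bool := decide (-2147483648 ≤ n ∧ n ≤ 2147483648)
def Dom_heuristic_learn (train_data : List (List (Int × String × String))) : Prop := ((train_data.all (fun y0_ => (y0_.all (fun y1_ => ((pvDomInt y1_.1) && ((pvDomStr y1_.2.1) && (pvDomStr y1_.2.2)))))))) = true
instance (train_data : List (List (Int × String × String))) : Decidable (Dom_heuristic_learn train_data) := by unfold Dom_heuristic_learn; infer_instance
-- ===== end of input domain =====

-- B groups labels per tag into a set in a first pass and collapses each set in a second pass,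
-- instead of A's single loop with a running '<ambiguous>' sentinel; same cost, different shape.


-- ===== PORT A =====
-- one body of A's inner loop: 'if word[1] in d and d[word[1]] != word[2]: d[word[1]] = "<ambiguous>" else: d[word[1]] = word[2]'
def hlStepA (d : PySem.Dict String String) (w : Int × String × String) : PySem.Dict String String :=
  if d.contains w.2.1 && !(d.getD w.2.1 "" == w.2.2) then d.insert w.2.1 "<ambiguous>"
  else d.insert w.2.1 w.2.2

def heuristic_learn (train_data : List (List (Int × String × String))) : List (String × String) :=
  ((PySem.List.enumerate train_data).foldl
    (fun d isent => (PySem.List.enumerate isent.2).foldl (fun d jw => hlStepA d jw.2) d)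
    PySem.Dict.empty).items

-- ===== PORT B =====
-- 'labels.setdefault(word[1], set()).add(word[2])'
def hlAddLabel (d : PySem.Dict String (PySem.Set String)) (w : Int × String × String) : PySem.Dict String (PySem.Set String) :=
  d.modify w.2.1 PySem.Set.empty (fun s => PySem.Set.add s w.2.2)

-- 'next(iter(s)) if len(s) == 1 else "<ambiguous>"'  (a 1-element set has a unique iteration value)
def hlCollapse (s : PySem.Set String) : String :=
  match s with
  | [l] => l
  | _ => "<ambiguous>"

def heuristic_learn_alt (train_data : List (List (Int × String × String))) : List (String × String) :=
  ((train_data.foldl (fun d sent => sent.foldl hlAddLabel d) PySem.Dict.empty).items.foldl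
    (fun r p => r.insert p.1 (hlCollapse p.2)) PySem.Dict.empty).items

-- ===== PRECONDITION & SPEC =====
def Spec_heuristic_learn (train_data : List (List (Int × String × String))) (out : List (String × String)) : Prop := out = heuristic_learn_alt train_data
instance (train_data : List (List (Int × String × String))) (out : List (String × String)) : Decidable (Spec_heuristic_learn train_data out) := by unfold Spec_heuristic_learn; infer_instance

-- ===== CLAIM (what is proved, stated in full; the proofs are below) =====
def Claim_equal_heuristic_learn : Prop := ∀ (train_data : List (List (Int × String × String))), Dom_heuristic_learn train_data → Spec_heuristic_learn train_data (heuristic_learn train_data)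

-- ===== LEMMAS AND PROOFS =====

-- abbreviation used throughout: the item-level image of B's dict under collapsing
def hlF (p : String × PySem.Set String) : String × String := (p.1, hlCollapse p.2)

-- enumerate indices are unused by both loops
theorem hl_foldl_enumerate {α β : Type} (g : β → α → β) (xs : List α) (n : Int) (b : β) :
    (PySem.List.enumerate xs n).foldl (fun d p => g d p.2) b = xs.foldl g b := by
  induction xs generalizing n b with
  | nil => rfl
  | cons x t ih => simp [PySem.List.enumerate, ih]

theorem hl_get?_map (l : List (String × PySem.Set String)) (t : String) :
    (PySem.Dict.mk (l.map hlF)).get? t = ((PySem.Dict.mk l).get? t).map hlCollapse := by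
  induction l with
  | nil => rfl
  | cons p rest ih =>
    obtain ⟨k, v⟩ := p
    simp only [List.map_cons, hlF, PySem.Dict.get?_mk_cons]
    by_cases h : (k == t) = true <;> simp [h, ih]

theorem hl_contains_map (l : List (String × PySem.Set String)) (t : String) :
    (PySem.Dict.mk (l.map hlF)).contains t = (PySem.Dict.mk l).contains t := by
  rw [PySem.Dict.contains_eq_isSome_get?, PySem.Dict.contains_eq_isSome_get?, hl_get?_map]
  cases (PySem.Dict.mk l).get? t <;> rfl

theorem hl_add_ne_nil (s : PySem.Set String) (x : String) : PySem.Set.add s x ≠ [] := by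
  unfold PySem.Set.add
  split
  · intro h; subst h; simp [PySem.Set.contains] at *
  · simp

-- inserting the collapsed value into the mapped dict = mapping after inserting the set
theorem hl_insert_map (d : PySem.Dict String (PySem.Set String)) (t : String) (v : PySem.Set String) :
    (PySem.Dict.mk (d.items.map hlF)).insert t (hlCollapse v)
      = PySem.Dict.mk ((d.insert t v).items.map hlF) := by
  unfold PySem.Dict.insert
  rw [show (PySem.Dict.mk (d.items.map hlF)).items = d.items.map hlF from rfl,
      show (PySem.Dict.mk (d.items.map hlF)).contains t = d.contains t from hl_contains_map d.items t]
  by_cases hc : d.contains t = true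
  · simp only [hc, if_true]
    congr 1
    rw [List.map_map, List.map_map]
    apply List.map_congr_left
    intro p _
    by_cases hp : p.1 = t <;> simp [hlF, hp]
  · simp only [hc, if_false, Bool.false_eq_true]
    congr 1
    simp [hlF]

-- collapsing B's updated set computes exactly A's branch on the collapsed current value
theorem hl_collapse_add (s : PySem.Set String) (hs : s ≠ []) (l : String) :
    (if !(hlCollapse s == l) then "<ambiguous>" else l) = hlCollapse (PySem.Set.add s l) := by
  match s, hs with
  | [x], _ =>
    by_cases hx : x = l
    · subst hx
      simp [PySem.Set.add, PySem.Set.contains, hlCollapse]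
    · have : PySem.Set.add [x] l = [x, l] := by
        simp [PySem.Set.add, PySem.Set.contains, Ne.symm hx]
      rw [this]
      simp [hlCollapse, hx]
  | a :: b :: t, _ =>
    have h2 : hlCollapse (PySem.Set.add (a :: b :: t) l) = "<ambiguous>" := by
      unfold PySem.Set.add
      split
      · rfl
      · simp [hlCollapse]
    rw [h2]
    by_cases hl : ("<ambiguous>" : String) = l <;> simp [hlCollapse, hl]

-- the collapsed value A stores at each step equals the collapse of B's updated set
theorem hl_step (d : PySem.Dict String (PySem.Set String))
    (hne : ∀ p ∈ d.items, p.2 ≠ []) (w : Int × String × String) :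
    hlStepA (PySem.Dict.mk (d.items.map hlF)) w = PySem.Dict.mk ((hlAddLabel d w).items.map hlF) := by
  unfold hlStepA hlAddLabel PySem.Dict.modify
  rw [hl_contains_map d.items w.2.1]
  by_cases hc : d.contains w.2.1 = true
  · obtain ⟨s, hs⟩ : ∃ s, d.get? w.2.1 = some s := by
      rw [PySem.Dict.contains_eq_isSome_get?] at hc
      exact Option.isSome_iff_exists.mp hc
    have hsmem : s ≠ [] := by
      have : ∃ p ∈ d.items, p.2 = s := by
        unfold PySem.Dict.get? at hs
        obtain ⟨p, hp1, hp2⟩ := Option.map_eq_some_iff.mp hs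
        exact ⟨p, List.mem_of_find?_eq_some hp1, hp2⟩
      obtain ⟨p, hp, hps⟩ := this
      exact hps ▸ hne p hp
    have hgd : (PySem.Dict.mk (d.items.map hlF)).getD w.2.1 "" = hlCollapse s := by
      unfold PySem.Dict.getD
      rw [hl_get?_map, hs]; rfl
    have hgd2 : d.getD w.2.1 PySem.Set.empty = s := by
      rw [PySem.Dict.getD_eq_get?_getD, hs]; rfl
    rw [hgd, hgd2, hc]
    rw [← hl_insert_map d w.2.1 (PySem.Set.add s w.2.2), ← hl_collapse_add s hsmem w.2.2]
    simp only [Bool.true_and]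
    by_cases h : (hlCollapse s == w.2.2) = true <;> simp [h]
  · have hcb : d.contains w.2.1 = false := by simpa using hc
    rw [hcb]
    simp only [Bool.false_and, Bool.false_eq_true, if_false]
    have hnone : d.get? w.2.1 = none := by
      rw [PySem.Dict.contains_eq_isSome_get?] at hcb
      cases h : d.get? w.2.1 with
      | none => rfl
      | some v => rw [h] at hcb; simp at hcb
    have hgd2 : d.getD w.2.1 PySem.Set.empty = PySem.Set.empty := by
      rw [PySem.Dict.getD_eq_get?_getD, hnone]; rfl
    rw [hgd2]
    have hadd : PySem.Set.add PySem.Set.empty w.2.2 = [w.2.2] := rfl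
    rw [show w.2.2 = hlCollapse (PySem.Set.add PySem.Set.empty w.2.2) from rfl]
    exact hl_insert_map d w.2.1 _

theorem hl_add_preserves (d : PySem.Dict String (PySem.Set String))
    (hne : ∀ p ∈ d.items, p.2 ≠ []) (w : Int × String × String) :
    ∀ p ∈ (hlAddLabel d w).items, p.2 ≠ [] := by
  unfold hlAddLabel PySem.Dict.modify PySem.Dict.insert
  split
  · intro p hp
    simp only [List.mem_map] at hp
    obtain ⟨q, hq, hqp⟩ := hp
    by_cases h : (q.1 == w.2.1) = true
    · simp only [h, if_true] at hqp
      rw [← hqp]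
      exact hl_add_ne_nil _ _
    · simp only [h] at hqp
      exact hqp ▸ hne q hq
  · intro p hp
    rcases List.mem_append.mp hp with h | h
    · exact hne p h
    · simp only [List.mem_singleton] at h
      rw [h]
      exact hl_add_ne_nil _ _

theorem hl_fold_words (ws : List (Int × String × String)) (d : PySem.Dict String (PySem.Set String))
    (hne : ∀ p ∈ d.items, p.2 ≠ []) :
    ws.foldl hlStepA (PySem.Dict.mk (d.items.map hlF))
        = PySem.Dict.mk ((ws.foldl hlAddLabel d).items.map hlF)
      ∧ ∀ p ∈ (ws.foldl hlAddLabel d).items, p.2 ≠ [] := by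
  induction ws generalizing d with
  | nil => exact ⟨rfl, hne⟩
  | cons w t ih =>
    simp only [List.foldl_cons]
    rw [hl_step d hne w]
    exact ih (hlAddLabel d w) (hl_add_preserves d hne w)

theorem hl_fold_sents (sents : List (List (Int × String × String)))
    (d : PySem.Dict String (PySem.Set String))
    (hne : ∀ p ∈ d.items, p.2 ≠ []) :
    sents.foldl (fun d s => s.foldl hlStepA d) (PySem.Dict.mk (d.items.map hlF))
        = PySem.Dict.mk ((sents.foldl (fun d s => s.foldl hlAddLabel d) d).items.map hlF)
      ∧ ∀ p ∈ (sents.foldl (fun d s => s.foldl hlAddLabel d) d).items, p.2 ≠ [] := by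
  induction sents generalizing d with
  | nil => exact ⟨rfl, hne⟩
  | cons s t ih =>
    simp only [List.foldl_cons]
    obtain ⟨h1, h2⟩ := hl_fold_words s d hne
    rw [h1]
    exact ih _ h2

theorem hl_nodup_keys (sents : List (List (Int × String × String)))
    (d : PySem.Dict String (PySem.Set String)) (h : d.keys.Nodup) :
    (sents.foldl (fun d s => s.foldl hlAddLabel d) d).keys.Nodup := by
  induction sents generalizing d with
  | nil => exact h
  | cons s t ih =>
    simp only [List.foldl_cons]
    apply ih
    have := PySem.Dict.nodup_keys_foldl_modify_key s (fun w => w.2.1) PySem.Set.empty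
      (fun _ w => fun s => PySem.Set.add s w.2.2) d h
    simpa [hlAddLabel] using this

-- ===== VERDICT (by name: the statement is the Claim_ definition above) =====
theorem heuristic_learn_spec : Claim_equal_heuristic_learn := by
  intro td _
  unfold Spec_heuristic_learn heuristic_learn heuristic_learn_alt
  simp only [hl_foldl_enumerate]
  have hempty : (PySem.Dict.empty : PySem.Dict String String)
      = PySem.Dict.mk (((PySem.Dict.empty : PySem.Dict String (PySem.Set String)).items).map hlF) := rfl
  obtain ⟨h1, _⟩ := hl_fold_sents td PySem.Dict.empty (by intro p hp; simp [PySem.Dict.empty] at hp)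
  conv_lhs => rw [hempty, h1]
  have hnodup : (td.foldl (fun d s => s.foldl hlAddLabel d) PySem.Dict.empty).keys.Nodup :=
    hl_nodup_keys td PySem.Dict.empty (by simp [PySem.Dict.empty, PySem.Dict.keys])
  have hfresh : ∀ a ∈ (td.foldl (fun d s => s.foldl hlAddLabel d) PySem.Dict.empty).items,
      (PySem.Dict.empty : PySem.Dict String String).contains a.1 = false := by
    intro a _; exact PySem.Dict.contains_empty a.1
  have hfin := PySem.Dict.items_foldl_insert_fresh
    (td.foldl (fun d s => s.foldl hlAddLabel d) PySem.Dict.empty).items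
    (fun p => p.1) (fun p => hlCollapse p.2)
    (PySem.Dict.empty : PySem.Dict String String) hfresh (by simpa [PySem.Dict.keys] using hnodup)
  beta_reduce at hfin
  rw [hfin]
  simp [hlF, PySem.Dict.empty]
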